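-- pv_equiv track=rewrite | github.com/mizadri/big-data | Coplete_Index/CompleteIndex.py | decode_delta_stream
-- ===== SOURCE A (Python) =====
-- def decode_delta_stream(bitarr):
-- 	count_len = 0
-- 	decoded_array = []
--
-- 	len_finished = False
-- 	calcular_delta = False
-- 	binary_num = 0
--
-- 	# Para leer una cadena de numeros en elias_delta primero se usa la tecnica de elias_gamma para
-- 	# reconstruir la longitud del numero binario y una vez se ha obtenido se pasa a una fase de leer
-- 	# el offset y recalcular el numero original
-- 	for bit in bitarr:
--
-- 		if calcular_delta:
-- 			delta_len -= 1
-- 			if bit == 1: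
-- 				delta_num += 2 ** delta_len
--
-- 			if delta_len == 0:
-- 				calcular_delta = False
-- 				decoded_array.append(delta_num)
--
-- 		else:
--
-- 			if not len_finished:
--
-- 				count_len += 1
-- 				if bit == 0:
-- 					len_finished = True
-- 					count_len -= 1
-- 					binary_num = 2 ** (count_len)
-- 					if count_len == 0:
-- 						decoded_array.append(1)
-- 						len_finished = False
-- 			else:
-- 				count_len -= 1
--
-- 				if bit == 1:
-- 					binary_num += 2 ** count_len
--
-- 				if count_len == 0:
-- 					calcular_delta = True
-- 					delta_len = binary_num - 1
-- 					delta_num = 2 ** delta_len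
-- 					len_finished = False
--
-- 	return decoded_array
-- ===== SOURCE B (Python) =====
-- # B: direct cursor-based decoder (explicit index + helper that reads a fixed
-- # number of bits), replacing A's flag-driven per-bit state machine.
--
-- def _read_bits(bitarr, n, i, exp, acc):
--     # Read `exp` bits starting at i, adding 2**e for each bit == 1.
--     # Returns (acc, new_i), or None if the stream ends mid-read.
--     while exp > 0:
--         if i >= n:
--             return None
--         exp -= 1
--         if bitarr[i] == 1:
--             acc += 2 ** exp
--         i += 1
--     return acc, i
--
-- def decode_delta_stream(bitarr):
--     n = len(bitarr)
--     out = []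
--     i = 0
--     while i < n:
--         # unary part: count bits until a 0
--         L = 0
--         while i < n and bitarr[i] != 0:
--             L += 1
--             i += 1
--         if i >= n:
--             break  # truncated: terminating zero never seen
--         i += 1  # consume the 0
--         if L == 0:
--             out.append(1)
--             continue
--         r = _read_bits(bitarr, n, i, L, 2 ** L)  # gamma-coded length M
--         if r is None:
--             break
--         M, i = r
--         dl = M - 1
--         r = _read_bits(bitarr, n, i, dl, 2 ** dl)  # offset of the value
--         if r is None:
--             break
--         val, i = r
--         out.append(val)
--     return out
-- ===== Notes on version B (the rewrite author's own statement) =====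
-- stated objective: simpler
-- what changed: Replace A's per-bit flag-driven state machine (len_finished/calcular_delta booleans threaded through one fold) by a direct cursor-based decoder: an index loop that per codeword counts the unary prefix, then reads the gamma length and the offset with one fixed-width bit-reading helper.
import Mathlib
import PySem

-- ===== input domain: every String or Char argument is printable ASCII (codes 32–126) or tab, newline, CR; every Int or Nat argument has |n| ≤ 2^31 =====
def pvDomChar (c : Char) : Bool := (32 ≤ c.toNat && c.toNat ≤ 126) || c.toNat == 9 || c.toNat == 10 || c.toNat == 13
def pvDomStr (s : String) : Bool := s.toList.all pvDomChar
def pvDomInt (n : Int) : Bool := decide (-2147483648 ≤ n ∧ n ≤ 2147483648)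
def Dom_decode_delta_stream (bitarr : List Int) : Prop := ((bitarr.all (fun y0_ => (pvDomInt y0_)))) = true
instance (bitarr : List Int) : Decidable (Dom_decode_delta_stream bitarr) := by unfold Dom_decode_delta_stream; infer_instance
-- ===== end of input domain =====

-- B replaces A's flag-driven per-bit state machine by a direct cursor-based decoder (simpler); same return value.

-- ===== PORT A =====
-- The loop state of A: count_len, len_finished, calcular_delta, binary_num, delta_len, delta_num, decoded_array.
structure StA where
  count_len : Int
  lenFin : Bool
  calcD : Bool
  binary : Int
  dlen : Int
  dnum : Int
  decoded : List Int
  deriving Repr, DecidableEq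

-- one iteration of A's `for bit in bitarr` body
def stepA (s : StA) (bit : Int) : StA :=
  if s.calcD then
    let dl := s.dlen - 1
    -- Python `2 ** delta_len`: delta_len ≥ 0 here on every reachable state, so .toNat is exact
    let dn := if bit = 1 then s.dnum + 2 ^ dl.toNat else s.dnum
    if dl = 0 then
      { s with dlen := dl, dnum := dn, calcD := false, decoded := s.decoded ++ [dn] }
    else
      { s with dlen := dl, dnum := dn }
  else
    if ¬ s.lenFin then
      let c := s.count_len + 1
      if bit = 0 then
        let c := c - 1
        -- Python `2 ** count_len`: count_len ≥ 0 here on every reachable state, so .toNat is exact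
        let b := (2 : Int) ^ c.toNat
        if c = 0 then
          -- len_finished is set True then immediately reset to False: net unchanged (false)
          { s with count_len := c, binary := b, lenFin := false, decoded := s.decoded ++ [1] }
        else
          { s with count_len := c, binary := b, lenFin := true }
      else
        { s with count_len := c }
    else
      let c := s.count_len - 1
      let b := if bit = 1 then s.binary + 2 ^ c.toNat else s.binary
      if c = 0 then
        -- Python `2 ** delta_len` with delta_len = binary_num - 1 ≥ 1 on every reachable state, so .toNat is exact
        { s with count_len := c, binary := b, calcD := true, dlen := b - 1,
                 dnum := 2 ^ (b - 1).toNat, lenFin := false }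
      else
        { s with count_len := c, binary := b }

def decode_delta_stream (bitarr : List Int) : List Int :=
  (bitarr.foldl stepA ⟨0, false, false, 0, 0, 0, []⟩).decoded

-- ===== PORT B =====
-- B's inner `while i < n and bitarr[i] != 0` loop: returns (final L, final i)
def readOnes (bits : List Int) (i L : Nat) : Nat × Nat :=
  if h : i < bits.length then
    if bits[i] ≠ 0 then readOnes bits (i + 1) (L + 1) else (L, i)
  else (L, i)
termination_by bits.length - i

-- B's `_read_bits` helper: read `exp` bits from i, adding 2 ** e per bit == 1; none if the stream ends
def readBits (bits : List Int) (i : Nat) (exp : Nat) (acc : Int) : Option (Int × Nat) :=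
  match exp with
  | 0 => some (acc, i)
  | e + 1 =>
      if h : i < bits.length then
        readBits bits (i + 1) e (if bits[i] = 1 then acc + 2 ^ e else acc)
      else none

-- cursor-monotonicity facts, needed for decodeFrom's termination
theorem readOnes_le (bits : List Int) (i L : Nat) : i ≤ (readOnes bits i L).2 := by
  rw [readOnes]
  split
  · split
    · exact Nat.le_trans (Nat.le_succ i) (readOnes_le bits (i + 1) (L + 1))
    · exact Nat.le_refl i
  · exact Nat.le_refl i
termination_by bits.length - i

theorem readBits_le (bits : List Int) : ∀ exp i acc v k,
    readBits bits i exp acc = some (v, k) → i ≤ k := by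
  intro exp
  induction exp with
  | zero => intro i acc v k h; simp [readBits] at h; omega
  | succ e ih =>
      intro i acc v k h
      rw [readBits] at h
      split at h
      · exact Nat.le_trans (Nat.le_succ i) (ih _ _ _ _ h)
      · exact absurd h (by simp)

-- B's outer `while i < n` loop, one iteration per decoded value
def decodeFrom (bits : List Int) (i : Nat) : List Int :=
  if h : i < bits.length then
    match hro : readOnes bits i 0 with
    | (L, j) =>
      if hj : j < bits.length then
        if L = 0 then 1 :: decodeFrom bits (j + 1)
        else
          match hk : readBits bits (j + 1) L (2 ^ L) with
          | none => []
          | some (M, k) =>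
              match hm : readBits bits k (M - 1).toNat (2 ^ (M - 1).toNat) with
              | none => []
              | some (v, m) => v :: decodeFrom bits m
      else []
  else []
termination_by bits.length - i
decreasing_by
  · have h1 := readOnes_le bits i 0
    rw [hro] at h1; omega
  · have h1 := readOnes_le bits i 0
    rw [hro] at h1
    have h2 := readBits_le bits _ _ _ _ _ hk
    have h3 := readBits_le bits _ _ _ _ _ hm
    omega

def decode_delta_stream_alt (bitarr : List Int) : List Int := decodeFrom bitarr 0

-- ===== PRECONDITION & SPEC =====
def Spec_decode_delta_stream (bitarr : List Int) (out : List Int) : Prop := out = decode_delta_stream_alt bitarr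
instance (bitarr : List Int) (out : List Int) : Decidable (Spec_decode_delta_stream bitarr out) := by unfold Spec_decode_delta_stream; infer_instance

-- ===== CLAIM (what is proved, stated in full; the proofs are below) =====
def Claim_equal_decode_delta_stream : Prop := ∀ (bitarr : List Int), Dom_decode_delta_stream bitarr → Spec_decode_delta_stream bitarr (decode_delta_stream bitarr)

-- ===== LEMMAS AND PROOFS =====

-- reading `exp` bits only ever adds to the accumulator
theorem readBits_ge_acc (bits : List Int) : ∀ (exp : Nat) (i : Nat) (acc v : Int) (k : Nat),
    readBits bits i exp acc = some (v, k) → acc ≤ v := by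
  intro exp
  induction exp with
  | zero => intro i acc v k h; simp [readBits] at h; omega
  | succ e ih =>
      intro i acc v k h
      rw [readBits] at h
      split at h
      · have := ih _ _ _ _ h
        have h2 : (0 : Int) ≤ 2 ^ e := by positivity
        split at this <;> omega
      · exact absurd h (by simp)

-- Phase 1 (unary length count): A's fold from a fresh/counting state, vs readOnes
theorem foldl_ones (bits : List Int) (i : Nat) (c : Nat) (b dl dn : Int) (d : List Int) :
    (List.foldl stepA ⟨(c : Int), false, false, b, dl, dn, d⟩ (bits.drop i)).decoded =
    (if (readOnes bits i c).2 < bits.length then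
       (if (readOnes bits i c).1 = 0 then
          (List.foldl stepA ⟨0, false, false, 1, dl, dn, d ++ [1]⟩
            (bits.drop ((readOnes bits i c).2 + 1))).decoded
        else
          (List.foldl stepA ⟨((readOnes bits i c).1 : Int), true, false,
              2 ^ (readOnes bits i c).1, dl, dn, d⟩
            (bits.drop ((readOnes bits i c).2 + 1))).decoded)
     else d) := by
  rw [readOnes]
  split
  · rename_i h
    split
    · rename_i hb
      rw [List.drop_eq_getElem_cons h, List.foldl_cons]
      have hs : stepA ⟨(c : Int), false, false, b, dl, dn, d⟩ bits[i]
          = ⟨((c + 1 : Nat) : Int), false, false, b, dl, dn, d⟩ := by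
        simp [stepA, hb]
      rw [hs, foldl_ones bits (i + 1) (c + 1) b dl dn d]
    · rename_i hb
      rw [List.drop_eq_getElem_cons h, List.foldl_cons]
      simp only [not_not] at hb
      by_cases hc : c = 0
      · have hs : stepA ⟨(c : Int), false, false, b, dl, dn, d⟩ bits[i]
            = ⟨0, false, false, 1, dl, dn, d ++ [1]⟩ := by
          subst hc; simp [stepA, hb]
        rw [hs]
        simp [hc]
      · have hs : stepA ⟨(c : Int), false, false, b, dl, dn, d⟩ bits[i]
            = ⟨(c : Int), true, false, 2 ^ c, dl, dn, d⟩ := by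
          simp [stepA, hb]
          exact hc
        rw [hs]
        simp [hc]
  · rename_i h
    have hd : bits.drop i = [] := List.drop_eq_nil_of_le (by omega)
    simp [hd]
termination_by bits.length - i

-- Phase 2 (reading the gamma-coded length): A's fold in the len_finished state, vs readBits
theorem foldl_lenbits (bits : List Int) (e : Nat) : ∀ (i : Nat) (b dl dn : Int) (d : List Int),
    (List.foldl stepA ⟨((e + 1 : Nat) : Int), true, false, b, dl, dn, d⟩ (bits.drop i)).decoded =
    (match readBits bits i (e + 1) b with
     | none => d
     | some (M, k) =>
         (List.foldl stepA ⟨0, false, true, M, M - 1, 2 ^ (M - 1).toNat, d⟩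
           (bits.drop k)).decoded) := by
  induction e with
  | zero =>
      intro i b dl dn d
      rw [readBits]
      by_cases h : i < bits.length
      · rw [dif_pos h, List.drop_eq_getElem_cons h, List.foldl_cons]
        have hs : stepA ⟨((1 : Nat) : Int), true, false, b, dl, dn, d⟩ bits[i]
            = ⟨0, false, true, (if bits[i] = 1 then b + 2 ^ 0 else b),
                (if bits[i] = 1 then b + 2 ^ 0 else b) - 1,
                2 ^ ((if bits[i] = 1 then b + 2 ^ 0 else b) - 1).toNat, d⟩ := by
          by_cases hb : bits[i] = 1 <;> simp [stepA, hb]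
        rw [hs]
        simp [readBits]
      · rw [dif_neg h]
        have hd : bits.drop i = [] := List.drop_eq_nil_of_le (by omega)
        simp [hd]
  | succ e ih =>
      intro i b dl dn d
      rw [readBits]
      by_cases h : i < bits.length
      · rw [dif_pos h, List.drop_eq_getElem_cons h, List.foldl_cons]
        have hs : stepA ⟨((e + 2 : Nat) : Int), true, false, b, dl, dn, d⟩ bits[i]
            = ⟨((e + 1 : Nat) : Int), true, false,
                (if bits[i] = 1 then b + 2 ^ (e + 1) else b), dl, dn, d⟩ := by
          by_cases hb : bits[i] = 1 <;>
            simp [stepA, hb, show ((e : Int) + 2).toNat = e + 2 from by omega,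
              show ¬((e : Int) + 2 - 1 = 0) from by omega,
              show e + 2 - 1 = e + 1 from rfl] <;> omega
        rw [show ((e + 1 + 1 : Nat) : Int) = ((e + 2 : Nat) : Int) from by push_cast; ring,
          hs, ih]
      · rw [dif_neg h]
        have hd : bits.drop i = [] := List.drop_eq_nil_of_le (by omega)
        simp [hd]

-- Phase 3 (reading the offset): A's fold in the calcular_delta state, vs readBits
theorem foldl_delta (bits : List Int) (e : Nat) : ∀ (i : Nat) (cl : Int) (lf : Bool)
    (b dn : Int) (d : List Int),
    (List.foldl stepA ⟨cl, lf, true, b, ((e + 1 : Nat) : Int), dn, d⟩ (bits.drop i)).decoded =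
    (match readBits bits i (e + 1) dn with
     | none => d
     | some (v, k) =>
         (List.foldl stepA ⟨cl, lf, false, b, 0, v, d ++ [v]⟩ (bits.drop k)).decoded) := by
  induction e with
  | zero =>
      intro i cl lf b dn d
      rw [readBits]
      by_cases h : i < bits.length
      · rw [dif_pos h, List.drop_eq_getElem_cons h, List.foldl_cons]
        have hs : stepA ⟨cl, lf, true, b, ((1 : Nat) : Int), dn, d⟩ bits[i]
            = ⟨cl, lf, false, b, 0, (if bits[i] = 1 then dn + 2 ^ 0 else dn),
                d ++ [if bits[i] = 1 then dn + 2 ^ 0 else dn]⟩ := by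
          by_cases hb : bits[i] = 1 <;> simp [stepA, hb]
        rw [hs]
        simp [readBits]
      · rw [dif_neg h]
        have hd : bits.drop i = [] := List.drop_eq_nil_of_le (by omega)
        simp [hd]
  | succ e ih =>
      intro i cl lf b dn d
      rw [readBits]
      by_cases h : i < bits.length
      · rw [dif_pos h, List.drop_eq_getElem_cons h, List.foldl_cons]
        have hs : stepA ⟨cl, lf, true, b, ((e + 2 : Nat) : Int), dn, d⟩ bits[i]
            = ⟨cl, lf, true, b, ((e + 1 : Nat) : Int),
                (if bits[i] = 1 then dn + 2 ^ (e + 1) else dn), d⟩ := by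
          by_cases hb : bits[i] = 1 <;>
            simp [stepA, hb, show ((e : Int) + 2).toNat = e + 2 from by omega,
              show ¬((e : Int) + 2 - 1 = 0) from by omega,
              show e + 2 - 1 = e + 1 from rfl] <;> omega
        rw [show ((e + 1 + 1 : Nat) : Int) = ((e + 2 : Nat) : Int) from by push_cast; ring,
          hs, ih]
      · rw [dif_neg h]
        have hd : bits.drop i = [] := List.drop_eq_nil_of_le (by omega)
        simp [hd]

-- Main loop correspondence, by fuel on the remaining length
theorem foldl_main (bits : List Int) : ∀ (K i : Nat), bits.length - i ≤ K →
    ∀ (b dl dn : Int) (d : List Int),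
    (List.foldl stepA ⟨0, false, false, b, dl, dn, d⟩ (bits.drop i)).decoded
      = d ++ decodeFrom bits i := by
  intro K
  induction K with
  | zero =>
      intro i hK b dl dn d
      have hi : ¬ i < bits.length := by omega
      have hd : bits.drop i = [] := List.drop_eq_nil_of_le (by omega)
      rw [decodeFrom, dif_neg hi]
      simp [hd]
  | succ K ih =>
      intro i hK b dl dn d
      by_cases hi : i < bits.length
      · have h0 := foldl_ones bits i 0 b dl dn d
        rcases hro : readOnes bits i 0 with ⟨L, j⟩
        have hij : i ≤ j := by have := readOnes_le bits i 0; rw [hro] at this; exact this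
        rw [hro] at h0
        simp only [Nat.cast_zero] at h0
        rw [decodeFrom, dif_pos hi]
        simp only [hro]
        rw [h0]
        by_cases hj : j < bits.length
        · rw [if_pos hj, dif_pos hj]
          by_cases hL : L = 0
          · subst hL
            rw [ih (j + 1) (by omega) 1 dl dn (d ++ [1])]
            simp
          · simp only [if_neg hL]
            obtain ⟨Le, rfl⟩ : ∃ Le, L = Le + 1 := ⟨L - 1, by omega⟩
            rw [foldl_lenbits bits Le (j + 1) (2 ^ (Le + 1)) dl dn d]
            rcases hk : readBits bits (j + 1) (Le + 1) (2 ^ (Le + 1)) with _ | ⟨M, k⟩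
            · simp only [hk]
              split
              · simp
              · rename_i M k heq
                simp only [hro] at heq
                simp only [hk] at heq
                exact absurd heq (by simp)
            · simp only [hk]
              split
              · rename_i heq
                simp only [hro] at heq
                simp only [hk] at heq
                exact absurd heq (by simp)
              · rename_i M' k' heq
                simp only [hro] at heq
                simp only [hk] at heq
                cases heq
                have hM : (2 : Int) ≤ M := by
                  have := readBits_ge_acc bits (Le + 1) (j + 1) _ _ _ hk
                  have h2 : (2 : Int) ≤ 2 ^ (Le + 1) := by
                    calc (2 : Int) = 2 ^ 1 := by ring
                    _ ≤ 2 ^ (Le + 1) := pow_le_pow_right₀ (by norm_num) (by omega)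
                  omega
                obtain ⟨em, hem⟩ : ∃ em : Nat, M - 1 = ((em + 1 : Nat) : Int) :=
                  ⟨(M - 2).toNat, by omega⟩
                have hemt : (M - 1).toNat = em + 1 := by omega
                rw [hemt, hem, foldl_delta bits em k 0 false M (2 ^ (em + 1)) d]
                rcases hm2 : readBits bits k (em + 1) (2 ^ (em + 1) : Int) with _ | ⟨v, m⟩ <;>
                  simp only [hm2]
                · simp
                · have hjk := readBits_le bits _ _ _ _ _ hk
                  have hkm := readBits_le bits _ _ _ _ _ hm2
                  rw [ih m (by omega) M 0 v (d ++ [v])]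
                  simp
        · rw [if_neg hj, dif_neg hj]
          simp
      · have hd : bits.drop i = [] := List.drop_eq_nil_of_le (by omega)
        rw [decodeFrom, dif_neg hi]
        simp [hd]

-- ===== VERDICT (by name: the statement is the Claim_ definition above) =====
theorem decode_delta_stream_spec : Claim_equal_decode_delta_stream := by
  intro bitarr _
  unfold Spec_decode_delta_stream decode_delta_stream decode_delta_stream_alt
  have := foldl_main bitarr bitarr.length 0 (by omega) 0 0 0 []
  simpa using this
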